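-- pv_equiv track=rewrite | github.com/lajmong/ICS31-Spring-2018- | lab6.py | cleaned_list_of_words
-- ===== SOURCE A (Python) =====
-- def cleaned_list_of_words(s: 'List of strings') -> 'List of words':
--     '''takes a list of strings as above and returns a list of individual words
-- with all white space and punctuation removed'''
--     punct = ' !?.,'
--     table = str.maketrans(punct, " "*len(punct))
--     result = []
--     for sentence in s:
--         non_punct = sentence.translate(table)
--         words = non_punct.split()
--         result.extend(words)
--     return result
-- ===== SOURCE B (Python) =====
-- def cleaned_list_of_words(s: 'List of strings') -> 'List of words':
--     '''takes a list of strings as above and returns a list of individual words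
-- with all white space and punctuation removed'''
--     result = []
--     for sentence in s:
--         buf = []
--         for ch in sentence:
--             if ch.isspace() or ch in '!?.,':
--                 if buf:
--                     result.append(''.join(buf))
--                     buf = []
--             else:
--                 buf.append(ch)
--         if buf:
--             result.append(''.join(buf))
--     return result
-- ===== Notes on version B (the rewrite author's own statement) =====
-- stated objective: alternative
-- what changed: Replaces the translate-punctuation-to-space + str.split() pipeline with an explicit single-pass character tokenizer that maintains a current-word buffer and emits a word at each delimiter boundary.
import Mathlib
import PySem

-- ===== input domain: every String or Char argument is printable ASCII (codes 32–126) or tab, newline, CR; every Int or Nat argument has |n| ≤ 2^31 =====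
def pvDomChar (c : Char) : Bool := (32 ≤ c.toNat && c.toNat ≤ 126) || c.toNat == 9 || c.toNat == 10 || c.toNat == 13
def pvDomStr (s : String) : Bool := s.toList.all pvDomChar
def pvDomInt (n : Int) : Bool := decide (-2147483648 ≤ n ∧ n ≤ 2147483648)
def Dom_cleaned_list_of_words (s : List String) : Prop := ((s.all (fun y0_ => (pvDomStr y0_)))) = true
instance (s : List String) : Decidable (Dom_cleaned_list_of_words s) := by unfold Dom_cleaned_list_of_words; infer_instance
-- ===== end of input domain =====

-- B replaces translate+split with an explicit one-pass character tokenizer; equal return values proved below.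
-- ===== PORT A =====
-- table = str.maketrans(' !?.,', ' '*5): each of these five chars maps to ' '; ported by hand, exact
def pvTranslate (c : Char) : Char := if ([' ', '!', '?', '.', ','].contains c) then ' ' else c

def cleaned_list_of_words (s : List String) : List String :=
  s.foldl (fun result sentence =>
    result ++ PySem.Str.split₀ (String.ofList ((sentence.toList.map pvTranslate)))) []

-- ===== PORT B =====
-- ch.isspace() or ch in '!?.,'
def pvIsDelim (c : Char) : Bool := PySem.Chars.isspace c || (['!', '?', '.', ','].contains c)

-- inner loop body: state = (result so far, current-word buffer)
def pvStep (st : List String × List Char) (c : Char) : List String × List Char :=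
  if pvIsDelim c then (if st.2.isEmpty then st else (st.1 ++ [String.ofList st.2], []))
  else (st.1, st.2 ++ [c])

-- trailing flush after a sentence
def pvFlush (st : List String × List Char) : List String :=
  if st.2.isEmpty then st.1 else st.1 ++ [String.ofList st.2]

def cleaned_list_of_words_alt (s : List String) : List String :=
  s.foldl (fun result sentence => pvFlush (sentence.toList.foldl pvStep (result, []))) []

-- ===== PRECONDITION & SPEC =====
def Spec_cleaned_list_of_words (s : List String) (out : List String) : Prop := out = cleaned_list_of_words_alt s
instance (s : List String) (out : List String) : Decidable (Spec_cleaned_list_of_words s out) := by unfold Spec_cleaned_list_of_words; infer_instance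

-- ===== CLAIM (what is proved, stated in full; the proofs are below) =====
def Claim_equal_cleaned_list_of_words : Prop := ∀ (s : List String), Dom_cleaned_list_of_words s → Spec_cleaned_list_of_words s (cleaned_list_of_words s)

-- ===== LEMMAS AND PROOFS =====

-- the translated character is whitespace exactly when B treats the original as a delimiter
lemma isspace_translate (c : Char) : PySem.Chars.isspace (pvTranslate c) = pvIsDelim c := by
  by_cases h : ([' ', '!', '?', '.', ','].contains c) = true
  · simp only [List.contains_eq_mem, List.mem_cons, List.not_mem_nil, or_false, decide_eq_true_eq] at h
    rcases h with h|h|h|h|h <;> subst h <;> decide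
  · simp only [Bool.not_eq_true] at h
    simp only [List.contains_eq_mem, List.mem_cons, List.not_mem_nil, or_false, decide_eq_false_iff_not] at h
    push Not at h
    obtain ⟨h1,h2,h3,h4,h5⟩ := h
    simp [pvTranslate, pvIsDelim, h1, h2, h3, h4, h5]

lemma translate_of_not_delim (c : Char) (h : pvIsDelim c = false) : pvTranslate c = c := by
  simp only [pvIsDelim, Bool.or_eq_false_iff] at h
  obtain ⟨hs, hm⟩ := h
  have hsp : c ≠ ' ' := by rintro rfl; exact absurd hs (by decide)
  simp only [List.contains_eq_mem, List.mem_cons, List.not_mem_nil, or_false, decide_eq_false_iff_not] at hm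
  push Not at hm
  simp [pvTranslate, hsp, hm.1, hm.2.1, hm.2.2.1, hm.2.2.2]

-- split₀.go's accumulator is purely a prefix
lemma go_acc (cs : List Char) (cur : List Char) (acc : List (List Char)) :
    PySem.Chars.split₀.go cs cur acc = acc.reverse ++ PySem.Chars.split₀.go cs cur [] := by
  induction cs generalizing cur acc with
  | nil => simp only [PySem.Chars.split₀.go]; split <;> simp
  | cons c rest ih =>
    simp only [PySem.Chars.split₀.go]
    split
    · split
      · exact ih _ _
      · rw [ih [] (cur.reverse :: acc), ih [] [cur.reverse]]; simp
    · exact ih _ _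

-- loop invariant: B's fold over a sentence equals appending A's split of the translated sentence
lemma fold_eq_go (cs : List Char) (buf : List Char) (acc : List String) :
    pvFlush (cs.foldl pvStep (acc, buf))
      = acc ++ (PySem.Chars.split₀.go (cs.map pvTranslate) buf.reverse []).map String.ofList := by
  induction cs generalizing buf acc with
  | nil =>
    simp only [List.foldl_nil, List.map_nil, PySem.Chars.split₀.go, pvFlush]
    by_cases hb : buf = []
    · subst hb; simp
    · simp [hb, List.isEmpty_iff]
  | cons c rest ih =>
    simp only [List.foldl_cons, List.map_cons, PySem.Chars.split₀.go, isspace_translate]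
    by_cases hd : pvIsDelim c
    · simp only [hd, if_true, pvStep]
      by_cases hb : buf = []
      · subst hb; simpa using ih [] acc
      · simp only [List.isEmpty_iff, hb, if_false, List.reverse_eq_nil_iff]
        rw [go_acc _ [] [buf.reverse.reverse], ih [] (acc ++ [String.ofList buf])]
        simp
    · simp only [hd, if_false, pvStep, Bool.false_eq_true]
      rw [translate_of_not_delim c (by simpa using hd)]
      rw [ih (buf ++ [c]) acc]
      simp

lemma sentence_eq (acc : List String) (sentence : String) :
    acc ++ PySem.Str.split₀ (String.ofList ((sentence.toList.map pvTranslate)))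
      = pvFlush (sentence.toList.foldl pvStep (acc, [])) := by
  rw [fold_eq_go]
  simp [PySem.Str.split₀, PySem.Chars.split₀]

lemma ports_agree (s : List String) : cleaned_list_of_words s = cleaned_list_of_words_alt s := by
  unfold cleaned_list_of_words cleaned_list_of_words_alt
  have h : (fun (result : List String) (sentence : String) =>
        result ++ PySem.Str.split₀ (String.ofList ((sentence.toList.map pvTranslate))))
      = (fun result sentence => pvFlush (sentence.toList.foldl pvStep (result, []))) := by
    funext acc sentence; exact sentence_eq acc sentence
  rw [h]


-- ===== VERDICT (by name: the statement is the Claim_ definition above) =====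
theorem cleaned_list_of_words_spec : Claim_equal_cleaned_list_of_words := by
  intro s _
  unfold Spec_cleaned_list_of_words
  exact ports_agree s
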